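-- pv_equiv track=rewrite | github.com/Epithex/NQ_AI | src/binary_dataset_creator.py | _get_split_pattern_distribution
-- ===== SOURCE A (Python) =====
-- from typing import Dict, List, Tuple, Optional
--
-- def _get_split_pattern_distribution(samples: List[Dict]) -> Dict:
--     """Get pattern distribution for a data split."""
--     if not samples:
--         return {}
--
--     patterns = [s["pattern"] for s in samples]
--     distribution = {}
--     for pattern in range(3):  # 0: Bearish, 1: Bullish, 2: Neutral
--         distribution[pattern] = patterns.count(pattern)
--
--     return distribution
-- ===== SOURCE B (Python) =====
-- def _get_split_pattern_distribution(samples):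
--     """Get pattern distribution for a data split."""
--     if not samples:
--         return {}
--
--     pats = sorted(s["pattern"] for s in samples)
--     c0 = c1 = c2 = 0
--     while pats:
--         x = pats[0]
--         j = 1
--         while j < len(pats) and pats[j] == x:
--             j += 1
--         if x == 0:
--             c0 = j
--         elif x == 1:
--             c1 = j
--         elif x == 2:
--             c2 = j
--         pats = pats[j:]
--
--     return {0: c0, 1: c1, 2: c2}
-- ===== Notes on version B (the rewrite author's own statement) =====
-- stated objective: alternative
-- what changed: replaces A's three full list.count scans with sort-then-run-length: sort the extracted patterns once, walk the sorted list run by run recording each run's length into scalar counters for 0/1/2, so duplicates are counted as contiguous runs instead of repeated scans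
import Mathlib
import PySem

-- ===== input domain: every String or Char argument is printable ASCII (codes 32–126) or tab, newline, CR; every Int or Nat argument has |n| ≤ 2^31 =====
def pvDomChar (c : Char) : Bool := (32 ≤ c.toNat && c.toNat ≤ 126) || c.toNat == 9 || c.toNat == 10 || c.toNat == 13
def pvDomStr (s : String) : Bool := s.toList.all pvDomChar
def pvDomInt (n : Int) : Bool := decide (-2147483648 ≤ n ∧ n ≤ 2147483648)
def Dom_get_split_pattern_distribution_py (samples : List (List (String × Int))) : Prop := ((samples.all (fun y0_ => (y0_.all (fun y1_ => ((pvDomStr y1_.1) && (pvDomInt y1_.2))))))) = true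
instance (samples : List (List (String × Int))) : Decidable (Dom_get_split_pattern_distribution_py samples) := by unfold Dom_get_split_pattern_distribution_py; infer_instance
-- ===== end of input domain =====

-- B sorts the extracted patterns once and walks the sorted list run by run (recording run lengths into three scalar counters), instead of A's three full count scans; equal cost class, different algorithm.


-- ===== PORT A =====
def get_split_pattern_distribution_py (samples : List (List (String × Int))) : List (Int × Int) :=
  if samples = [] then []
  else
    let patterns := samples.map (fun s => (PySem.Dict.mk s).getD "pattern" 0)
    ((PySem.List.pyRange 0 3 1).foldl
      (fun d p => d.insert p ((patterns.count p : Int))) PySem.Dict.empty).items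

-- ===== PORT B =====
-- inner loop 'while j < len(pats) and pats[j] == x: j += 1' counted over the tail
def pvRunLen (x : Int) : List Int → Nat
  | [] => 0
  | y :: ys => if y == x then pvRunLen x ys + 1 else 0

-- outer 'while pats:' loop carrying the three counters c0, c1, c2
def pvRLLoop : List Int → Int → Int → Int → Int × Int × Int
  | [], c0, c1, c2 => (c0, c1, c2)
  | x :: rest, c0, c1, c2 =>
    let j : Nat := 1 + pvRunLen x rest
    let rest' := rest.drop (pvRunLen x rest)   -- pats = pats[j:]
    if x = 0 then pvRLLoop rest' (j : Int) c1 c2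
    else if x = 1 then pvRLLoop rest' c0 (j : Int) c2
    else if x = 2 then pvRLLoop rest' c0 c1 (j : Int)
    else pvRLLoop rest' c0 c1 c2
termination_by l => l.length
decreasing_by all_goals simp [List.length_drop]

def get_split_pattern_distribution_py_alt (samples : List (List (String × Int))) : List (Int × Int) :=
  if samples = [] then []
  else
    let pats := PySem.List.sorted (samples.map (fun s => (PySem.Dict.mk s).getD "pattern" 0)) (fun x => x) false
    let c := pvRLLoop pats 0 0 0
    [(0, c.1), (1, c.2.1), (2, c.2.2)]

-- ===== PRECONDITION & SPEC =====
-- Pre_ excludes exactly the samples missing a "pattern" key, on which Python's s["pattern"] raises KeyError in both A and B.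
def Pre_get_split_pattern_distribution_py (samples : List (List (String × Int))) : Prop :=
  samples.all (fun s => s.any (fun kv => kv.1 == "pattern")) = true
instance (samples : List (List (String × Int))) : Decidable (Pre_get_split_pattern_distribution_py samples) := by unfold Pre_get_split_pattern_distribution_py; infer_instance
def pvWitness_get_split_pattern_distribution_py : (List (List (String × Int))) :=
  [[("pattern", 0)], [("pattern", 2), ("x", 7)], [("pattern", 0)]]

def Spec_get_split_pattern_distribution_py (samples : List (List (String × Int))) (out : List (Int × Int)) : Prop := out = get_split_pattern_distribution_py_alt samples
instance (samples : List (List (String × Int))) (out : List (Int × Int)) : Decidable (Spec_get_split_pattern_distribution_py samples out) := by unfold Spec_get_split_pattern_distribution_py; infer_instance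

-- ===== CLAIM (what is proved, stated in full; the proofs are below) =====
def Claim_equal_get_split_pattern_distribution_py : Prop := ∀ (samples : List (List (String × Int))), Dom_get_split_pattern_distribution_py samples → Pre_get_split_pattern_distribution_py samples → Spec_get_split_pattern_distribution_py samples (get_split_pattern_distribution_py samples)

-- ===== LEMMAS AND PROOFS =====
-- On a sorted list, the head's run length equals the head's total count in the tail.
theorem runLen_count (x : Int) (l : List Int) (h : (x :: l).Pairwise (· ≤ ·)) :
    pvRunLen x l = l.count x := by
  induction l with
  | nil => rfl
  | cons y ys ih =>
    rcases List.pairwise_cons.1 h with ⟨hx, hyl⟩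
    by_cases hyx : y = x
    · subst hyx
      simp [pvRunLen]
      exact ih (List.pairwise_cons.2 ⟨fun z hz => (List.pairwise_cons.1 hyl).1 z hz, (List.pairwise_cons.1 hyl).2⟩)
    · have hxy : x < y := lt_of_le_of_ne (hx y (by simp)) (fun e => hyx e.symm)
      have : ys.count x = 0 := by
        rw [List.count_eq_zero]
        intro hmem
        have := (List.pairwise_cons.1 hyl).1 x hmem
        omega
      simp [pvRunLen, hyx, this]

-- The dropped prefix is all x's: counts of other values survive the drop.
theorem count_drop_ne (x k : Int) (l : List Int) (hk : k ≠ x) :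
    (l.drop (pvRunLen x l)).count k = l.count k := by
  induction l with
  | nil => rfl
  | cons y ys ih =>
    by_cases hyx : y = x
    · subst hyx
      simp [pvRunLen, Ne.symm hk, ih]
    · simp [pvRunLen, hyx]

theorem count_drop_self (x : Int) (l : List Int) (h : (x :: l).Pairwise (· ≤ ·)) :
    (l.drop (pvRunLen x l)).count x = 0 := by
  induction l with
  | nil => rfl
  | cons y ys ih =>
    rcases List.pairwise_cons.1 h with ⟨hx, hyl⟩
    by_cases hyx : y = x
    · subst hyx
      simp only [pvRunLen, beq_self_eq_true, if_true, List.drop_succ_cons]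
      exact ih (List.pairwise_cons.2 ⟨fun z hz => (List.pairwise_cons.1 hyl).1 z hz, (List.pairwise_cons.1 hyl).2⟩)
    · have hxy : x < y := lt_of_le_of_ne (hx y (by simp)) (fun e => hyx e.symm)
      have h0 : ys.count x = 0 := by
        rw [List.count_eq_zero]
        intro hmem
        have := (List.pairwise_cons.1 hyl).1 x hmem
        omega
      simp [pvRunLen, hyx, h0]

theorem pairwise_drop_run (x : Int) (l : List Int) (h : (x :: l).Pairwise (· ≤ ·)) :
    (l.drop (pvRunLen x l)).Pairwise (· ≤ ·) := by
  have hl : l.Pairwise (· ≤ ·) := (List.pairwise_cons.1 h).2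
  exact hl.sublist (List.drop_sublist _ _)

-- Run-length scan over a sorted list: each counter ends at that value's count (untouched if absent).
theorem rl_spec : ∀ (n : Nat) (l : List Int), l.length ≤ n → l.Pairwise (· ≤ ·) →
    ∀ c0 c1 c2 : Int,
    pvRLLoop l c0 c1 c2 =
      ((if l.count 0 = 0 then c0 else (l.count 0 : Int)),
       (if l.count 1 = 0 then c1 else (l.count 1 : Int)),
       (if l.count 2 = 0 then c2 else (l.count 2 : Int))) := by
  intro n
  induction n with
  | zero =>
    intro l hl _ c0 c1 c2
    have : l = [] := List.eq_nil_of_length_eq_zero (Nat.le_zero.1 hl)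
    subst this; simp [pvRLLoop]
  | succ m ih =>
    intro l hl hs c0 c1 c2
    match l with
    | [] => simp [pvRLLoop]
    | x :: rest =>
      have hr : pvRunLen x rest = rest.count x := runLen_count x rest hs
      have hlen : (rest.drop (pvRunLen x rest)).length ≤ m := by
        have := List.length_drop (l := rest) (i := pvRunLen x rest)
        simp at hl
        omega
      have hsort : (rest.drop (pvRunLen x rest)).Pairwise (· ≤ ·) := pairwise_drop_run x rest hs
      have hself : (rest.drop (pvRunLen x rest)).count x = 0 := count_drop_self x rest hs
      have hcx : (x :: rest).count x = 1 + pvRunLen x rest := by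
        simp [List.count_cons, hr]; omega
      have hne : ∀ k : Int, k ≠ x →
          (rest.drop (pvRunLen x rest)).count k = (x :: rest).count k := by
        intro k hk
        rw [count_drop_ne x k rest hk]
        simp [List.count_cons, Ne.symm hk]
      unfold pvRLLoop
      by_cases h0 : x = 0
      · subst h0
        rw [if_pos rfl, ih _ hlen hsort, hne 1 (by norm_num), hne 2 (by norm_num), hself, hcx]
        have hnz : 1 + pvRunLen 0 rest ≠ 0 := by omega
        simp [hnz]
      · rw [if_neg h0]
        by_cases h1 : x = 1
        · subst h1
          rw [if_pos rfl, ih _ hlen hsort, hne 0 (by norm_num), hne 2 (by norm_num), hself, hcx]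
          have hnz : 1 + pvRunLen 1 rest ≠ 0 := by omega
          simp [hnz]
        · rw [if_neg h1]
          by_cases h2 : x = 2
          · subst h2
            rw [if_pos rfl, ih _ hlen hsort, hne 0 (by norm_num), hne 1 (by norm_num), hself, hcx]
            have hnz : 1 + pvRunLen 2 rest ≠ 0 := by omega
            simp [hnz]
          · rw [if_neg h2]
            rw [ih _ hlen hsort, hne 0 (fun e => h0 e.symm), hne 1 (fun e => h1 e.symm),
                hne 2 (fun e => h2 e.symm)]

-- ===== VERDICT (by name: the statement is the Claim_ definition above) =====
theorem get_split_pattern_distribution_py_spec : Claim_equal_get_split_pattern_distribution_py := by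
  intro samples _ _
  unfold Spec_get_split_pattern_distribution_py
  unfold get_split_pattern_distribution_py get_split_pattern_distribution_py_alt
  by_cases h : samples = []
  · simp [h]
  · simp only [if_neg h]
    have hperm := PySem.List.sorted_perm (xs := samples.map (fun s => (PySem.Dict.mk s).getD "pattern" 0)) (key := fun x => x) (rev := false)
    have hpair : (PySem.List.sorted (samples.map (fun s => (PySem.Dict.mk s).getD "pattern" 0)) (fun x => x) false).Pairwise (· ≤ ·) := by
      have := PySem.List.sorted_pairwise (xs := samples.map (fun s => (PySem.Dict.mk s).getD "pattern" 0)) (key := fun x => x)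
      simpa using this
    have hrl := rl_spec (PySem.List.sorted (samples.map (fun s => (PySem.Dict.mk s).getD "pattern" 0)) (fun x => x) false).length _ le_rfl hpair 0 0 0
    have hc : ∀ p : Int, (PySem.List.sorted (samples.map (fun s => (PySem.Dict.mk s).getD "pattern" 0)) (fun x => x) false).count p = (samples.map (fun s => (PySem.Dict.mk s).getD "pattern" 0)).count p :=
      fun p => hperm.count_eq p
    have hzero : ∀ (cnt : Nat), (if cnt = 0 then (0 : Int) else (cnt : Int)) = (cnt : Int) := by
      intro cnt; split <;> simp_all
    rw [show PySem.List.pyRange 0 3 1 = [0, 1, 2] from by decide]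
    simp only [List.foldl]
    rw [hrl]
    simp only [hc, hzero]
    simp [PySem.Dict.insert, PySem.Dict.empty, PySem.Dict.contains]
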